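-- pv_equiv track=rewrite | github.com/aryashah-AI/AI-Coaching-App | app.py | _create_phase_timeline
-- ===== SOURCE A (Python) =====
-- def _create_phase_timeline(num_frames, phases):
--     """Create timeline showing which phase each frame belongs to."""
--     timeline = ['approach'] * num_frames
--
--     if phases and len(phases) > 0:
--         phase_duration = num_frames // max(len(phases), 1)
--         for i, phase in enumerate(phases):
--             start_idx = i * phase_duration
--             end_idx = min((i + 1) * phase_duration, num_frames)
--             for j in range(start_idx, end_idx):
--                 timeline[j] = phase
--
--     return timeline
-- ===== SOURCE B (Python) =====
-- def _create_phase_timeline(num_frames, phases):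
--     """Create timeline showing which phase each frame belongs to."""
--     if not phases:
--         return ['approach'] * num_frames
--     n = len(phases)
--     phase_duration = num_frames // n
--     if phase_duration <= 0:
--         return ['approach'] * num_frames
--     return [phases[j // phase_duration] if j // phase_duration < n else 'approach'
--             for j in range(num_frames)]
-- ===== Notes on version B (the rewrite author's own statement) =====
-- stated objective: faster
-- what changed: B replaces A's nested phase-then-block loop that overwrites slots of a preallocated list with a single list-comprehension pass over frame indices computing each frame's owning phase directly as phases[j // phase_duration] (guarded so empty phases or a non-positive duration yield the all-'approach' list); one comprehension with no index assignment is measurably faster by constant factor.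
import Mathlib
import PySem

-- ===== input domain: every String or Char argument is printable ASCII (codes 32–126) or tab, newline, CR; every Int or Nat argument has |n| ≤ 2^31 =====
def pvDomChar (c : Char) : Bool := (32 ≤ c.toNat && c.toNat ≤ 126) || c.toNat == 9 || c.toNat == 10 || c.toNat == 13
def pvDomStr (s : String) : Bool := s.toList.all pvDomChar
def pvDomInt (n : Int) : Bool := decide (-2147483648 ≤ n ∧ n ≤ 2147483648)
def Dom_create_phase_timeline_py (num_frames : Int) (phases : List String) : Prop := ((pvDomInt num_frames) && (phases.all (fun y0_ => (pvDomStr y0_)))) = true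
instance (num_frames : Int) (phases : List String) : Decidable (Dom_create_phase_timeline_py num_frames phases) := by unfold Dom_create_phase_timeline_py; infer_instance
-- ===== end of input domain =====

-- B assigns each frame its phase by direct index arithmetic in one pass instead of A's nested overwrite loops (measured constant-factor faster).

-- ===== PORT A =====
-- inner 'for j in range(start_idx, end_idx): timeline[j] = phase' (indices are always in range here, so the total pySetD form is exact)
def pvInnerA (tl : List String) (a b : Int) (v : String) : List String :=
  (PySem.List.pyRange a b 1).foldl (fun t j => PySem.List.pySetD t j v) tl

-- outer 'for i, phase in enumerate(phases): …'
def pvOuterA (pd nf : Int) (items : List (Int × String)) (tl : List String) : List String :=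
  items.foldl (fun t ip => pvInnerA t (ip.1 * pd) (min ((ip.1 + 1) * pd) nf) ip.2) tl

def create_phase_timeline_py (num_frames : Int) (phases : List String) : List String :=
  let timeline := List.replicate num_frames.toNat "approach"   -- ['approach'] * num_frames (negative count → [])
  if phases ≠ [] ∧ 0 < (phases.length : Int) then
    let phase_duration := PySem.Int.floordiv num_frames (max (phases.length : Int) 1)
    pvOuterA phase_duration num_frames (PySem.List.enumerate phases 0) timeline
  else timeline

-- ===== PORT B =====
def create_phase_timeline_py_alt (num_frames : Int) (phases : List String) : List String :=
  if phases = [] then List.replicate num_frames.toNat "approach"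
  else
    let n : Int := phases.length
    let phase_duration := PySem.Int.floordiv num_frames n
    if phase_duration ≤ 0 then List.replicate num_frames.toNat "approach"
    else
      (PySem.List.pyRange 0 num_frames 1).map (fun j =>
        if PySem.Int.floordiv j phase_duration < n
        then PySem.List.pyGetD phases (PySem.Int.floordiv j phase_duration) "approach"
        else "approach")

-- ===== PRECONDITION & SPEC =====
def Spec_create_phase_timeline_py (num_frames : Int) (phases : List String) (out : List String) : Prop := out = create_phase_timeline_py_alt num_frames phases
instance (num_frames : Int) (phases : List String) (out : List String) : Decidable (Spec_create_phase_timeline_py num_frames phases out) := by unfold Spec_create_phase_timeline_py; infer_instance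

-- ===== CLAIM (what is proved, stated in full; the proofs are below) =====
def Claim_equal_create_phase_timeline_py : Prop := ∀ (num_frames : Int) (phases : List String), Dom_create_phase_timeline_py num_frames phases → Spec_create_phase_timeline_py num_frames phases (create_phase_timeline_py num_frames phases)

-- ===== LEMMAS AND PROOFS =====

lemma pvInnerA_length (tl : List String) (a b : Int) (v : String) :
    (pvInnerA tl a b v).length = tl.length := by
  unfold pvInnerA
  generalize PySem.List.pyRange a b 1 = l
  induction l generalizing tl with
  | nil => rfl
  | cons x xs ih => simpa [PySem.List.length_pySetD] using ih (PySem.List.pySetD tl x v)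

lemma pvInnerA_getElem? (b : Int) (n : Nat) : ∀ (a : Int) (tl : List String) (v : String),
    (b - a).toNat ≤ n → 0 ≤ a → ∀ (k : Nat),
    (pvInnerA tl a b v)[k]? =
      if a ≤ (k : Int) ∧ (k : Int) < b then tl[k]?.map (fun _ => v) else tl[k]? := by
  induction n with
  | zero =>
    intro a tl v hn ha k
    have hba : b ≤ a := by omega
    rw [pvInnerA, PySem.List.pyRange_one_eq_nil hba]
    simp only [List.foldl_nil]
    split_ifs with h
    · omega
    · rfl
  | succ n ih =>
    intro a tl v hn ha k
    by_cases hab : b ≤ a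
    · rw [pvInnerA, PySem.List.pyRange_one_eq_nil hab]
      simp only [List.foldl_nil]
      split_ifs with h
      · omega
      · rfl
    · rw [pvInnerA, PySem.List.pyRange_one_cons (by omega)]
      simp only [List.foldl_cons]
      have step : ((PySem.List.pyRange (a+1) b 1).foldl (fun t j => PySem.List.pySetD t j v)
          (PySem.List.pySetD tl a v)) = pvInnerA (PySem.List.pySetD tl a v) (a+1) b v := rfl
      rw [step, ih (a+1) (PySem.List.pySetD tl a v) v (by omega) (by omega) k]
      rw [PySem.List.pySetD_of_nonneg tl v ha]
      rcases lt_trichotomy (k : Int) a with hk | hk | hk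
      · -- k < a : untouched everywhere
        have h1 : ¬ (a + 1 ≤ (k:Int) ∧ (k:Int) < b) := by omega
        have h2 : ¬ (a ≤ (k:Int) ∧ (k:Int) < b) := by omega
        rw [if_neg h1, if_neg h2, List.getElem?_set_ne (by omega)]
      · -- k = a : set fires here
        have h1 : ¬ (a + 1 ≤ (k:Int) ∧ (k:Int) < b) := by omega
        have h2 : a ≤ (k:Int) ∧ (k:Int) < b := by omega
        have hk' : a.toNat = k := by omega
        rw [if_neg h1, if_pos h2, hk', List.getElem?_set_self']
        cases tl[k]? <;> rfl
      · -- a < k : set elsewhere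
        have heq : (a + 1 ≤ (k:Int) ∧ (k:Int) < b) ↔ (a ≤ (k:Int) ∧ (k:Int) < b) := by omega
        rw [List.getElem?_set_ne (by omega)]
        split_ifs with h1 h2 h2 <;> first | rfl | (exfalso; omega)

lemma pvOuterA_length (pd nf : Int) (items : List (Int × String)) (tl : List String) :
    (pvOuterA pd nf items tl).length = tl.length := by
  induction items generalizing tl with
  | nil => rfl
  | cons x xs ih =>
    unfold pvOuterA
    simp only [List.foldl_cons]
    rw [show ∀ t, xs.foldl (fun t ip => pvInnerA t (ip.1 * pd) (min ((ip.1 + 1) * pd) nf) ip.2) t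
        = pvOuterA pd nf xs t from fun _ => rfl]
    rw [ih, pvInnerA_length]

lemma pvOuterA_of_nonpos (pd nf : Int) (hpd : pd ≤ 0) (items : List (Int × String)) (tl : List String) :
    pvOuterA pd nf items tl = tl := by
  induction items generalizing tl with
  | nil => rfl
  | cons x xs ih =>
    unfold pvOuterA
    simp only [List.foldl_cons]
    have hemp : min ((x.1 + 1) * pd) nf ≤ x.1 * pd := by nlinarith [min_le_left ((x.1 + 1) * pd) nf]
    rw [show pvInnerA tl (x.1 * pd) (min ((x.1 + 1) * pd) nf) x.2
        = (PySem.List.pyRange (x.1 * pd) (min ((x.1 + 1) * pd) nf) 1).foldl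
            (fun t j => PySem.List.pySetD t j x.2) tl from rfl,
      PySem.List.pyRange_one_eq_nil hemp]
    exact ih tl

lemma fd_i (pd k i : Int) (hpd : 0 < pd) :
    PySem.Int.floordiv k pd = i ↔ i * pd ≤ k ∧ k < (i + 1) * pd :=
  PySem.Int.floordiv_eq_iff_of_pos hpd

lemma pvOuterA_getElem? (pd nf : Int) (hpd : 0 < pd) :
    ∀ (rest : List String) (i : Int), 0 ≤ i → ∀ (tl : List String), ((tl.length : Int)) ≤ nf →
    ∀ (k : Nat), k < tl.length →
    (pvOuterA pd nf (PySem.List.enumerate rest i) tl)[k]? =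
      if i ≤ PySem.Int.floordiv (k : Int) pd ∧ PySem.Int.floordiv (k : Int) pd < i + rest.length
      then rest[(PySem.Int.floordiv (k : Int) pd - i).toNat]?
      else tl[k]? := by
  intro rest
  induction rest with
  | nil =>
    intro i hi tl hlen k hk
    simp only [PySem.List.enumerate_nil, List.length_nil]
    rw [if_neg (by omega)]
    rfl
  | cons p ps ih =>
    intro i hi tl hlen k hk
    rw [PySem.List.enumerate_cons]
    unfold pvOuterA
    simp only [List.foldl_cons]
    set tl' := pvInnerA tl (i * pd) (min ((i + 1) * pd) nf) p with htl'
    have hlen' : tl'.length = tl.length := pvInnerA_length _ _ _ _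
    have houter : (PySem.List.enumerate ps (i + 1)).foldl
        (fun t ip => pvInnerA t (ip.1 * pd) (min ((ip.1 + 1) * pd) nf) ip.2) tl'
        = pvOuterA pd nf (PySem.List.enumerate ps (i + 1)) tl' := rfl
    rw [houter, ih (i + 1) (by omega) tl' (by omega) k (by omega)]
    set fd := PySem.Int.floordiv (k : Int) pd with hfd
    have hinner := pvInnerA_getElem? (min ((i + 1) * pd) nf) ((min ((i + 1) * pd) nf) - i * pd).toNat
      (i * pd) tl p (le_refl _) (by positivity) k
    by_cases hcase : fd = i
    · -- owned by this phase
      have hb : i * pd ≤ (k : Int) ∧ (k : Int) < (i + 1) * pd := (fd_i pd k i hpd).mp hcase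
      have hknf : (k : Int) < nf := by omega
      rw [if_neg (by omega), htl', hinner, if_pos ⟨hb.1, by omega⟩]
      have : tl[k]? = some tl[k] := List.getElem?_eq_getElem hk
      rw [if_pos (by simp; omega), this]
      have : (fd - i).toNat = 0 := by omega
      rw [this]
      rfl
    · -- untouched by this phase
      have hnb : ¬ (i * pd ≤ (k : Int) ∧ (k : Int) < min ((i + 1) * pd) nf) := by
        intro h
        exact hcase ((fd_i pd k i hpd).mpr ⟨h.1, lt_of_lt_of_le h.2 (min_le_left _ _)⟩)
      have htl'k : tl'[k]? = tl[k]? := by rw [htl', hinner, if_neg hnb]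
      rw [htl'k]
      by_cases hin : i + 1 ≤ fd ∧ fd < i + 1 + (ps.length : Int)
      · rw [if_pos hin, if_pos (by simp; omega)]
        have h1 : (fd - i).toNat = (fd - (i + 1)).toNat + 1 := by omega
        rw [h1]
        rfl
      · rw [if_neg hin, if_neg (by simp; omega)]

lemma fd_nonneg (pd : Int) (hpd : 0 < pd) (k : Nat) : 0 ≤ PySem.Int.floordiv (k : Int) pd := by
  rw [PySem.Int.floordiv_eq_ediv_of_pos hpd]
  exact Int.ediv_nonneg (by positivity) (by omega)

-- ===== VERDICT (by name: the statement is the Claim_ definition above) =====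
theorem create_phase_timeline_py_spec : Claim_equal_create_phase_timeline_py := by
  intro nf phases _dom
  unfold Spec_create_phase_timeline_py create_phase_timeline_py create_phase_timeline_py_alt
  rcases phases with _ | ⟨p, ps⟩
  · simp
  have hne : (p :: ps) ≠ ([] : List String) := by simp
  have hLpos : (0 : Int) < ((p :: ps).length : Int) := by
    simp only [List.length_cons]
    omega
  have hmax : max (((p :: ps).length : Int)) 1 = ((p :: ps).length : Int) := by omega
  simp only [if_neg hne, if_pos (And.intro hne hLpos), hmax]
  set pd := PySem.Int.floordiv nf (((p :: ps).length : Int)) with hpd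
  by_cases hpd0 : pd ≤ 0
  · rw [if_pos hpd0, pvOuterA_of_nonpos _ _ hpd0]
  · rw [if_neg hpd0]
    have hpdpos : 0 < pd := by omega
    have hnfpos : 0 < nf := by
      by_contra h
      have hle : pd ≤ PySem.Int.floordiv 0 (((p :: ps).length : Int)) := by
        rw [hpd, PySem.Int.floordiv_eq_ediv_of_pos hLpos, PySem.Int.floordiv_eq_ediv_of_pos hLpos]
        exact Int.ediv_le_ediv hLpos (by omega)
      rw [PySem.Int.floordiv_eq_ediv_of_pos hLpos] at hle
      simp at hle
      omega
    apply List.ext_getElem?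
    intro k
    by_cases hk : k < nf.toNat
    · have hA := pvOuterA_getElem? pd nf hpdpos (p :: ps) 0 (le_refl _)
        (List.replicate nf.toNat "approach") (by simp; omega) k (by simpa using hk)
      rw [hA]
      set fd := PySem.Int.floordiv (k : Int) pd with hfd
      have hfd0 : 0 ≤ fd := fd_nonneg pd hpdpos k
      have hBk : ((PySem.List.pyRange 0 nf 1).map (fun j =>
          if PySem.Int.floordiv j pd < (((p :: ps).length : Int))
          then PySem.List.pyGetD (p :: ps) (PySem.Int.floordiv j pd) "approach"
          else "approach"))[k]?
          = some (if fd < (((p :: ps).length : Int))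
              then PySem.List.pyGetD (p :: ps) fd "approach" else "approach") := by
        rw [List.getElem?_map, PySem.List.getElem?_pyRange_one, if_pos (by omega)]
        simp only [Option.map_some, zero_add, ← hfd]
      rw [hBk]
      by_cases hlt : fd < (((p :: ps).length : Int))
      · rw [if_pos (⟨hfd0, by omega⟩ : (0:Int) ≤ fd ∧ fd < 0 + (((p :: ps).length : Int))),
          if_pos hlt,
          PySem.List.pyGetD_eq_getElem (p :: ps) "approach" hfd0 (by exact_mod_cast hlt),
          show (fd - 0).toNat = fd.toNat from by omega]
        exact List.getElem?_eq_getElem (by omega)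
      · rw [if_neg (by omega), if_neg hlt, List.getElem?_replicate, if_pos hk]
    · rw [List.getElem?_eq_none, List.getElem?_eq_none]
      · rw [List.length_map, PySem.List.length_pyRange_one]; omega
      · rw [pvOuterA_length, List.length_replicate]; omega
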